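-- pv_equiv track=rewrite | github.com/Nestallum/Argumentation_TER | src/util.py | build_attackers_adjacency_list
-- ===== SOURCE A (Python) =====
-- def build_attackers_adjacency_list(OG, UG) -> dict:
--     """
--     Builds and returns the adjacency list of attackers for arguments in OG based on UG.
--
--     Args:
--         OG (dict): The subgraph represented as a dictionary.
--         UG (dict): The universe graph represented as a dictionary.
--
--     Returns:
--         dict: The adjacency list of attackers for arguments in OG.
--         Key : attacking argument, Value : list of attacked arguments (may be empty).
--     """
--
--     attackers_adjacency_list = {}
--
--     for OG_key in OG.keys():
--         attackers_adjacency_list[OG_key] = []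
--         for UG_key, UG_value in UG.items() :
--             if(OG_key in UG_value):
--                 attackers_adjacency_list[OG_key].append(UG_key)
--
--     return attackers_adjacency_list
-- ===== SOURCE B (Python) =====
-- def build_attackers_adjacency_list(OG, UG) -> dict:
--     """Two staged passes: build a reverse index over all UG edges once,
--     then answer each OG key by a single lookup in that index."""
--     reverse_index = {}
--     for UG_key, UG_value in UG.items():
--         for target in set(UG_value):
--             reverse_index.setdefault(target, []).append(UG_key)
--     return {OG_key: reverse_index.get(OG_key, []) for OG_key in OG}
-- ===== Notes on version B (the rewrite author's own statement) =====
-- stated objective: faster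
-- what changed: Instead of rescanning every UG edge list once per OG key (nested loops over OG x UG), B first builds a reverse index dict in one pass over UG's edges (appending each UG key to the entry of every distinct target) and then produces the result by a single dict-comprehension lookup per OG key.
import Mathlib
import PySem

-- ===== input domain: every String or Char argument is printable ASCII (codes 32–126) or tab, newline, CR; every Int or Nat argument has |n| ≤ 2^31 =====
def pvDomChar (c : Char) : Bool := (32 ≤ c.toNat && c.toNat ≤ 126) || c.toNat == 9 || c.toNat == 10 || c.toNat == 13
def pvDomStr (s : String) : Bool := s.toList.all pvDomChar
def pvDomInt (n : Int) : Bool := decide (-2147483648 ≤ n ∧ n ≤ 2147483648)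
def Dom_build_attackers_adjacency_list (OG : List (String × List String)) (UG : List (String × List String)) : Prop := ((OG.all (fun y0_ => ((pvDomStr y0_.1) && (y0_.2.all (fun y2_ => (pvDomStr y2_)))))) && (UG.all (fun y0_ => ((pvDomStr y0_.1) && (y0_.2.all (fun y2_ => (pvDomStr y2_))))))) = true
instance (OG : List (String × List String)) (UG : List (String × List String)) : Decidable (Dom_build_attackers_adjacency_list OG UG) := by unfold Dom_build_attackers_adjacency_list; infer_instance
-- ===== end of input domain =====

-- B builds a reverse index over UG's edges in one staged pass and then answers each OG key by a
-- single lookup, instead of rescanning all of UG for every OG key: asymptotically faster algorithm.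


-- ===== PORT A =====
-- for OG_key in OG.keys(): result[OG_key] = []; for UG_key, UG_value in UG.items(): if OG_key in UG_value: result[OG_key].append(UG_key)
def build_attackers_adjacency_list (OG : List (String × List String)) (UG : List (String × List String)) : List (String × List String) :=
  let UGd := PySem.Dict.ofList UG
  ((PySem.Dict.ofList OG).keys.foldl (fun d OG_key =>
      UGd.items.foldl (fun d p =>
        if p.2.contains OG_key then d.modify OG_key [] (· ++ [p.1]) else d)
        (d.insert OG_key []))
    PySem.Dict.empty).items

-- ===== PORT B =====
-- reverse_index = {}; for UG_key, UG_value in UG.items(): for target in set(UG_value): reverse_index.setdefault(target, []).append(UG_key)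
-- return {OG_key: reverse_index.get(OG_key, []) for OG_key in OG}
def build_attackers_adjacency_list_alt (OG : List (String × List String)) (UG : List (String × List String)) : List (String × List String) :=
  let rev := (PySem.Dict.ofList UG).items.foldl (fun d p =>
      (PySem.Set.ofList p.2).foldl (fun d target => d.modify target [] (· ++ [p.1])) d)
    PySem.Dict.empty
  ((PySem.Dict.ofList OG).keys.foldl
      (fun d OG_key => d.insert OG_key (rev.getD OG_key [])) PySem.Dict.empty).items

-- ===== PRECONDITION & SPEC =====
def Spec_build_attackers_adjacency_list (OG : List (String × List String)) (UG : List (String × List String)) (out : List (String × List String)) : Prop := out = build_attackers_adjacency_list_alt OG UG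
instance (OG : List (String × List String)) (UG : List (String × List String)) (out : List (String × List String)) : Decidable (Spec_build_attackers_adjacency_list OG UG out) := by unfold Spec_build_attackers_adjacency_list; infer_instance

-- ===== CLAIM =====
def Claim_equal_build_attackers_adjacency_list : Prop := ∀ (OG : List (String × List String)) (UG : List (String × List String)), Dom_build_attackers_adjacency_list OG UG → Spec_build_attackers_adjacency_list OG UG (build_attackers_adjacency_list OG UG)

-- ===== LEMMAS AND PROOFS =====

-- the attackers of k: UG keys whose value list contains k, in UG order
def pvAttackers (UG : List (String × List String)) (k : String) : List String :=
  (((PySem.Dict.ofList UG).items.filter (fun p => p.2.contains k)).map (·.1))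

-- A's inner loop, lookup at any key
theorem A_inner_getD (L : List (String × List String)) (k k' : String)
    (d : PySem.Dict String (List String)) :
    (L.foldl (fun d p => if p.2.contains k then d.modify k [] (· ++ [p.1]) else d) d).getD k' []
      = if k' = k then d.getD k [] ++ (L.filter (fun p => p.2.contains k)).map (·.1)
        else d.getD k' [] := by
  induction L generalizing d with
  | nil => by_cases hk : k' = k <;> simp [hk]
  | cons p L ih =>
    simp only [List.foldl_cons, List.filter_cons]
    by_cases hc : p.2.contains k
    · rw [if_pos hc, if_pos hc, ih, PySem.Dict.getD_modify]
      by_cases hk : k' = k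
      · subst hk; simp
      · rw [if_neg hk, if_neg hk]
        exact PySem.Dict.getD_modify_of_ne d [] _ hk
    · rw [if_neg hc, if_neg hc, ih]

-- A's inner loop keeps the key set (it only modifies the present key k)
theorem A_inner_keys (L : List (String × List String)) (k : String)
    (d : PySem.Dict String (List String)) (hk : d.contains k = true) :
    (L.foldl (fun d p => if p.2.contains k then d.modify k [] (· ++ [p.1]) else d) d).keys
      = d.keys := by
  induction L generalizing d with
  | nil => rfl
  | cons p L ih =>
    simp only [List.foldl_cons]
    by_cases hc : p.2.contains k
    · rw [if_pos hc, ih _ (by simp [PySem.Dict.contains_modify])]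
      rw [PySem.Dict.keys_modify, PySem.Dict.keys_insert_of_contains _ _ hk]
    · rw [if_neg hc, ih _ hk]

-- A's outer loop key set
theorem A_outer_keys (UG : List (String × List String)) (ks : List String)
    (d : PySem.Dict String (List String)) :
    (ks.foldl (fun d k =>
        (PySem.Dict.ofList UG).items.foldl (fun d p =>
          if p.2.contains k then d.modify k [] (· ++ [p.1]) else d) (d.insert k []))
      d).keys = PySem.Set.update d.keys ks := by
  induction ks generalizing d with
  | nil => rfl
  | cons k ks ih =>
    simp only [List.foldl_cons]
    rw [ih, PySem.Set.update_cons]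
    congr 1
    rw [A_inner_keys _ _ _ (PySem.Dict.contains_insert_self _ _ _),
        PySem.Set.add_eq_ite]
    by_cases hm : k ∈ d.keys
    · rw [PySem.Dict.keys_insert_of_contains _ _ ((PySem.Dict.contains_iff_mem_keys d k).2 hm), if_pos hm]
    · rw [PySem.Dict.keys_insert_of_not_contains _ _ (by
        cases h : d.contains k
        · rfl
        · exact absurd ((PySem.Dict.contains_iff_mem_keys d k).1 h) hm), if_neg hm]

-- A's outer loop, lookup at any key
theorem A_outer_getD (UG : List (String × List String)) (ks : List String) (k : String)
    (d : PySem.Dict String (List String)) :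
    (ks.foldl (fun d k' =>
        (PySem.Dict.ofList UG).items.foldl (fun d p =>
          if p.2.contains k' then d.modify k' [] (· ++ [p.1]) else d) (d.insert k' []))
      d).getD k [] = if k ∈ ks then pvAttackers UG k else d.getD k [] := by
  induction ks generalizing d with
  | nil => simp
  | cons k0 ks ih =>
    simp only [List.foldl_cons, ih]
    by_cases hm : k ∈ ks
    · simp [hm]
    · rw [if_neg hm, A_inner_getD]
      by_cases hk : k = k0
      · subst hk
        simp [pvAttackers]
      · simp [hk, hm, PySem.Dict.getD_insert]

-- B's inner loop (setdefault+append over distinct targets), lookup at any key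
theorem B_inner_getD (ts : List String) (x : String) (k : String)
    (d : PySem.Dict String (List String)) (hnd : ts.Nodup) :
    (ts.foldl (fun d t => d.modify t [] (· ++ [x])) d).getD k []
      = if k ∈ ts then d.getD k [] ++ [x] else d.getD k [] := by
  induction ts generalizing d with
  | nil => simp
  | cons t ts ih =>
    have hnt : t ∉ ts := (List.nodup_cons.1 hnd).1
    simp only [List.foldl_cons]
    rw [ih _ hnd.of_cons]
    by_cases hk : k = t
    · subst hk
      simp [hnt, PySem.Dict.getD_modify_self]
    · rw [PySem.Dict.getD_modify_of_ne _ _ _ hk]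
      simp [hk]

-- B's reverse-index pass, lookup at any key
theorem B_rev_getD (L : List (String × List String)) (k : String)
    (d : PySem.Dict String (List String)) :
    (L.foldl (fun d p =>
        (PySem.Set.ofList p.2).foldl (fun d t => d.modify t [] (· ++ [p.1])) d) d).getD k []
      = d.getD k [] ++ (L.filter (fun p => p.2.contains k)).map (·.1) := by
  induction L generalizing d with
  | nil => simp
  | cons p L ih =>
    simp only [List.foldl_cons, List.filter_cons]
    rw [ih, B_inner_getD _ _ _ _ (PySem.Set.nodup_ofList _)]
    have hmem : k ∈ PySem.Set.ofList p.2 ↔ (p.2.contains k = true) := by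
      rw [PySem.Set.mem_ofList, List.contains_iff_mem]
    by_cases hc : p.2.contains k
    · rw [if_pos (hmem.2 hc), if_pos hc]; simp
    · rw [if_neg (fun h => hc (hmem.1 h)), if_neg hc]

-- ===== VERDICT (by name: the statement is the Claim_ definition above) =====
theorem build_attackers_adjacency_list_spec : Claim_equal_build_attackers_adjacency_list := by
  intro OG UG _
  unfold Spec_build_attackers_adjacency_list build_attackers_adjacency_list build_attackers_adjacency_list_alt
  simp only []
  set K := (PySem.Dict.ofList OG).keys with hKdef
  have hKnd : K.Nodup := PySem.Dict.nodup_keys_ofList OG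
  set DA := K.foldl (fun d OG_key =>
      (PySem.Dict.ofList UG).items.foldl (fun d p =>
        if p.2.contains OG_key then d.modify OG_key [] (· ++ [p.1]) else d)
        (d.insert OG_key [])) PySem.Dict.empty with hDA
  set rev := (PySem.Dict.ofList UG).items.foldl (fun d p =>
      (PySem.Set.ofList p.2).foldl (fun d target => d.modify target [] (· ++ [p.1])) d)
    PySem.Dict.empty with hrev
  have hKA : DA.keys = K := by
    rw [hDA, A_outer_keys, PySem.Dict.keys_empty, PySem.Set.update_nil_left,
        PySem.Set.ofList_eq_self_of_nodup _ hKnd]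
  -- B's final comprehension: inserts over fresh distinct keys, so items are a map over K
  have hB : (K.foldl (fun d OG_key => d.insert OG_key (rev.getD OG_key [])) PySem.Dict.empty).items
      = K.map (fun k => (k, rev.getD k [])) := by
    rw [PySem.Dict.items_foldl_insert_fresh _ _ _ _
          (fun a _ => PySem.Dict.contains_empty a) (by simpa using hKnd)]
    rfl
  rw [hB, PySem.Dict.items_eq_map_keys DA (hKA ▸ hKnd) [], hKA]
  refine List.map_congr_left (fun k hk => ?_)
  have hA : DA.getD k [] = pvAttackers UG k := by
    rw [hDA, A_outer_getD, if_pos hk]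
  have hBk : rev.getD k [] = pvAttackers UG k := by
    rw [hrev, B_rev_getD]
    simp [pvAttackers]
  rw [hA, hBk]
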